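-- pv_equiv track=rewrite | github.com/antonyedgar-coder/office_suite | tasks/recurrence.py | _anchor_month_quarter
-- ===== SOURCE A (Python) =====
-- _QUARTER_MONTHS = {
--     1: 4,  # Q1 starts April
--     2: 7,
--     3: 10,
--     4: 1,  # Q4 starts January (next calendar year in FY)
-- }
--
-- def _anchor_month_quarter(fy: int, q: int, anchor: str) -> tuple[int, int]:
--     """Return (year, month) for create anchor in quarter q of FY starting fy."""
--     if q == 4:
--         months = [1, 2, 3]
--         base_year = fy + 1
--     else:
--         months = [_QUARTER_MONTHS[q] + i for i in range(3)]
--         base_year = fy if q > 1 or months[0] >= 4 else fy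
--         if q == 1:
--             base_year = fy
--     if anchor == "first_month_same_qtr":
--         m = months[0]
--         y = fy + 1 if m < 4 else fy
--         if q == 1:
--             y = fy
--         elif q == 2:
--             y = fy
--         elif q == 3:
--             y = fy
--         else:
--             y = fy + 1
--         return y, m
--     if anchor == "last_month_same_qtr":
--         m = months[-1]
--         y = fy + 1 if m < 4 else fy
--         return y, m
--     # first_month_next_qtr
--     nq = q + 1 if q < 4 else 1
--     return _anchor_month_quarter(fy, nq, "first_month_same_qtr")
-- ===== SOURCE B (Python) =====
-- def _anchor_month_quarter(fy: int, q: int, anchor: str) -> tuple[int, int]: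
--     # Closed-form arithmetic: quarter q (1-4) starts at absolute month 3*q counted
--     # from January of fy, i.e. calendar month (3*q) % 12 + 1 in year fy + (3*q) // 12.
--     if not 1 <= q <= 4:
--         raise KeyError(q)  # invalid quarter
--     eq = q if anchor in ("first_month_same_qtr", "last_month_same_qtr") else q % 4 + 1
--     off = 2 if anchor == "last_month_same_qtr" else 0
--     return fy + (3 * eq) // 12, (3 * eq) % 12 + 1 + off
-- ===== Notes on version B (the rewrite author's own statement) =====
-- stated objective: simpler
-- what changed: Replaces A's month-table lookup, list building, dead base_year code, per-quarter branch chains and self-recursion with one closed-form arithmetic formula: after validating q, effective quarter eq (q, or q%4+1 for the next-quarter anchor) gives month (3*eq)%12+1+offset and year fy+(3*eq)//12.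
import Mathlib
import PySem

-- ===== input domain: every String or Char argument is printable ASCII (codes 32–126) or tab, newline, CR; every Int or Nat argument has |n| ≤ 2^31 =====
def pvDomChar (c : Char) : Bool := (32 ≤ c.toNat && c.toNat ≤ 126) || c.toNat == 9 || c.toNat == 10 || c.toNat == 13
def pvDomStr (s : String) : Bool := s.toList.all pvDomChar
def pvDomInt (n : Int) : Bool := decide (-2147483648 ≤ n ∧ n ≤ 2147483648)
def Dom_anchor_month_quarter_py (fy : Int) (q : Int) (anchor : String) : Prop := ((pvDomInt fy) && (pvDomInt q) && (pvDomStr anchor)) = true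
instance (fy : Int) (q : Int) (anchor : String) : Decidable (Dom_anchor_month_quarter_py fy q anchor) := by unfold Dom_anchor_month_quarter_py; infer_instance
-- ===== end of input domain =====

-- B replaces A's month table, dead base_year code, branch chains and self-recursion by one
-- closed-form modular-arithmetic formula (simpler); return-value equivalence on q ∈ {1,2,3,4}.

-- ===== PORT A =====
def QUARTER_MONTHS : PySem.Dict Int Int := PySem.Dict.ofList [(1, 4), (2, 7), (3, 10), (4, 1)]

-- _QUARTER_MONTHS[q] raises KeyError for q ∉ keys; Pre_ excludes that, getD 0 is the total stand-in.
def anchor_month_quarter_py (fy : Int) (q : Int) (anchor : String) : Int × Int :=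
  let months : List Int :=
    if q = 4 then [1, 2, 3]
    else (PySem.List.pyRange 0 3 1).map (fun i => PySem.Dict.getD QUARTER_MONTHS q 0 + i)
  let base_year : Int :=
    if q = 4 then fy + 1
    else
      let b := if q > 1 ∨ PySem.List.pyGetD months 0 0 ≥ 4 then fy else fy
      if q = 1 then fy else b
  if _h1 : anchor = "first_month_same_qtr" then
    let m := PySem.List.pyGetD months 0 0
    let y := if m < 4 then fy + 1 else fy
    let y := if q = 1 then fy else if q = 2 then fy else if q = 3 then fy else fy + 1
    (y, m)
  else if _h2 : anchor = "last_month_same_qtr" then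
    let m := PySem.List.pyGetD months (-1) 0
    let y := if m < 4 then fy + 1 else fy
    (y, m)
  else
    let nq := if q < 4 then q + 1 else 1
    anchor_month_quarter_py fy nq "first_month_same_qtr"
termination_by (if anchor = "first_month_same_qtr" then 0 else 1 : Nat)
decreasing_by simp [_h1]

-- ===== PORT B =====
def anchor_month_quarter_py_alt (fy : Int) (q : Int) (anchor : String) : Int × Int :=
  let eq : Int :=
    if anchor = "first_month_same_qtr" ∨ anchor = "last_month_same_qtr" then q
    else PySem.Int.mod q 4 + 1
  let off : Int := if anchor = "last_month_same_qtr" then 2 else 0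
  (fy + PySem.Int.floordiv (3 * eq) 12, PySem.Int.mod (3 * eq) 12 + 1 + off)

-- ===== PRECONDITION & SPEC =====
-- A raises KeyError on the quarter-month dict for q outside {1,2,3,4}; Pre_ excludes exactly those.
def Pre_anchor_month_quarter_py (fy : Int) (q : Int) (anchor : String) : Prop :=
  q = 1 ∨ q = 2 ∨ q = 3 ∨ q = 4
instance (fy : Int) (q : Int) (anchor : String) : Decidable (Pre_anchor_month_quarter_py fy q anchor) := by unfold Pre_anchor_month_quarter_py; infer_instance
def pvWitness_anchor_month_quarter_py : Int × Int × String := (2024, 2, "last_month_same_qtr")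

def Spec_anchor_month_quarter_py (fy : Int) (q : Int) (anchor : String) (out : Int × Int) : Prop := out = anchor_month_quarter_py_alt fy q anchor
instance (fy : Int) (q : Int) (anchor : String) (out : Int × Int) : Decidable (Spec_anchor_month_quarter_py fy q anchor out) := by unfold Spec_anchor_month_quarter_py; infer_instance

-- ===== CLAIM =====
def Claim_equal_anchor_month_quarter_py : Prop := ∀ (fy : Int) (q : Int) (anchor : String), Dom_anchor_month_quarter_py fy q anchor → Pre_anchor_month_quarter_py fy q anchor → Spec_anchor_month_quarter_py fy q anchor (anchor_month_quarter_py fy q anchor)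

-- ===== LEMMAS AND PROOFS =====

-- ===== VERDICT =====
theorem anchor_month_quarter_py_spec : Claim_equal_anchor_month_quarter_py := by
  intro fy q anchor _ hpre
  unfold Spec_anchor_month_quarter_py
  by_cases h1 : anchor = "first_month_same_qtr" <;>
  by_cases h2 : anchor = "last_month_same_qtr" <;>
  rcases hpre with rfl | rfl | rfl | rfl <;>
  simp [anchor_month_quarter_py, anchor_month_quarter_py_alt, h1, h2,
        QUARTER_MONTHS, PySem.Int.mod, PySem.Int.floordiv, PySem.List.pyGetD, PySem.List.pyGet?,
        PySem.List.pyIdx?, PySem.List.pyRange, PySem.Dict.getD, PySem.Dict.get?, PySem.Dict.ofList] <;>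
  decide
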